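-- pv_equiv track=rewrite | github.com/sanjana-d/csc384-Intro-To-AI | Labs/A4-starter-files-dasadias/naive_bayes.py | min_fill_ordering_helper
-- ===== SOURCE A (Python) =====
-- def min_fill_ordering_helper(list_of_scopes, vars_to_eliminate, variable_query):
--     ### YOUR CODE HERE ###
--     # for each var in dict, if we eliminate them, what vars will be affected?
--     for var in vars_to_eliminate.keys():
--         num = 0
--         for scope in list_of_scopes:
--             if var in scope:
--                 for v in scope:
--                     if v != var:
--                         num += 1
--         vars_to_eliminate[var] = num
--
--     sorted_vars = dict(sorted(vars_to_eliminate.items(), key=lambda item: item[1]))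
--     list_vars = list(sorted_vars.keys())
--
--     var_elim = None
--     if len(list_vars) > 0:
--         var_elim = list_vars[0]
--
--     new_scope = []
--     # generate new scope
--     for s in list_of_scopes:
--         if var_elim in s:
--             for v in s:
--                 if not v in new_scope:
--                     new_scope.append(v)
--     if var_elim in new_scope:
--         new_scope.remove(var_elim)
--
--     return var_elim, new_scope
-- ===== SOURCE B (Python) =====
-- def min_fill_ordering_helper(list_of_scopes, vars_to_eliminate, variable_query):
--     # One pass over the scopes tallies every variable's fill count at once
--     # (A rescans the whole scope list once per variable); first minimum via min().
--     counts = {var: 0 for var in vars_to_eliminate}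
--     for scope in list_of_scopes:
--         length = len(scope)
--         occ = {}
--         for v in scope:
--             occ[v] = occ.get(v, 0) + 1
--         for v, c in occ.items():
--             if v in counts:
--                 counts[v] = counts[v] + (length - c)
--     if not counts:
--         return None, []
--     var_elim = min(counts.items(), key=lambda item: item[1])[0]
--     new_scope = []
--     for s in list_of_scopes:
--         if var_elim in s:
--             for v in s:
--                 if v != var_elim and v not in new_scope:
--                     new_scope.append(v)
--     return var_elim, new_scope
-- ===== Notes on version B (the rewrite author's own statement) =====
-- stated objective: faster
-- what changed: Replaces A's per-variable rescan of all scopes (and the full sort of all variables) by a single pass over the scopes that tallies every variable's fill count via per-scope occurrence counters, then picks the first minimum with min() instead of sorting.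
import Mathlib
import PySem

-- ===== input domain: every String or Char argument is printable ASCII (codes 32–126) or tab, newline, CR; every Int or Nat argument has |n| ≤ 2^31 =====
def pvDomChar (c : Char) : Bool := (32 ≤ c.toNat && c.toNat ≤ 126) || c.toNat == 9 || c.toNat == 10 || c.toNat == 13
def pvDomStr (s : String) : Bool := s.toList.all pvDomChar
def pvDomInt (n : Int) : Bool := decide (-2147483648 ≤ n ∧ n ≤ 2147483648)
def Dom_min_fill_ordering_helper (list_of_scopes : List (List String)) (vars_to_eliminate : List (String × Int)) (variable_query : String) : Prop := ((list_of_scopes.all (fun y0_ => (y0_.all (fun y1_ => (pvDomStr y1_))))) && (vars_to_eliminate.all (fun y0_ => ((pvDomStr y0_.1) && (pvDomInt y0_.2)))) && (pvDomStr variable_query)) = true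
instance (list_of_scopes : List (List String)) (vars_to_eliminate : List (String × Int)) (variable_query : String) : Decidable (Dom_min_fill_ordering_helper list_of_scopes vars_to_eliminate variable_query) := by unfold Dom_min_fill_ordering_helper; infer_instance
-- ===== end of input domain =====

-- B tallies every variable's fill count in ONE pass over the scopes (per-scope occurrence
-- counters) instead of A's rescan of all scopes per variable, and takes the first minimum
-- with min() instead of sorting all variables.  Return value only: Python A overwrites the
-- values of vars_to_eliminate in place, B does not touch it.

-- ===== PORT A =====
def min_fill_ordering_helper (list_of_scopes : List (List String)) (vars_to_eliminate : List (String × Int)) (variable_query : String) : Option String × List String :=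
  let d0 : PySem.Dict String Int := PySem.Dict.ofList vars_to_eliminate
  -- for var in vars_to_eliminate.keys(): … vars_to_eliminate[var] = num
  let d1 : PySem.Dict String Int := d0.keys.foldl (fun dd var =>
      dd.insert var (list_of_scopes.foldl (fun num scope =>
        if scope.contains var then
          scope.foldl (fun n v => if v ≠ var then n + 1 else n) num
        else num) 0)) d0
  let sorted_vars : PySem.Dict String Int :=
    PySem.Dict.ofList (PySem.List.sorted d1.items (fun item => item.2) false)
  let list_vars : List String := sorted_vars.keys
  let var_elim : Option String := if 0 < list_vars.length then list_vars[0]? else none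
  let new_scope : List String := list_of_scopes.foldl (fun ns s =>
      if (match var_elim with | some v => s.contains v | none => false) then
        s.foldl (fun ns2 v => if ¬ ns2.contains v then ns2 ++ [v] else ns2) ns
      else ns) []
  let new_scope2 : List String := match var_elim with
    | some v => if new_scope.contains v then (PySem.List.remove? new_scope v).getD new_scope else new_scope
    | none => new_scope
  (var_elim, new_scope2)

-- ===== PORT B =====
def min_fill_ordering_helper_alt (list_of_scopes : List (List String)) (vars_to_eliminate : List (String × Int)) (variable_query : String) : Option String × List String :=
  -- counts = {var: 0 for var in vars_to_eliminate}   (iterating the dict = its distinct keys)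
  let K : List String := PySem.Set.ofList (vars_to_eliminate.map Prod.fst)
  let init : PySem.Dict String Int := K.foldl (fun d var => d.insert var 0) PySem.Dict.empty
  let counts : PySem.Dict String Int := list_of_scopes.foldl (fun cnt scope =>
      let length : Int := PySem.List.len scope
      let occ : PySem.Dict String Int :=
        scope.foldl (fun d v => d.insert v (d.getD v 0 + 1)) PySem.Dict.empty
      occ.items.foldl (fun cnt p =>
        if cnt.contains p.1 then cnt.insert p.1 (cnt.getD p.1 0 + (length - p.2)) else cnt) cnt) init
  -- if not counts: return None, []  /  min(counts.items(), key=…)[0]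
  match PySem.List.min? counts.items (fun item => item.2) with
  | none => (none, [])
  | some best =>
    let var_elim : String := best.1
    let new_scope : List String := list_of_scopes.foldl (fun ns s =>
        if s.contains var_elim then
          s.foldl (fun ns v => if v ≠ var_elim ∧ ¬ ns.contains v then ns ++ [v] else ns) ns
        else ns) []
    (some var_elim, new_scope)

-- ===== PRECONDITION & SPEC =====
def Spec_min_fill_ordering_helper (list_of_scopes : List (List String)) (vars_to_eliminate : List (String × Int)) (variable_query : String) (out : Option String × List String) : Prop := out = min_fill_ordering_helper_alt list_of_scopes vars_to_eliminate variable_query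
instance (list_of_scopes : List (List String)) (vars_to_eliminate : List (String × Int)) (variable_query : String) (out : Option String × List String) : Decidable (Spec_min_fill_ordering_helper list_of_scopes vars_to_eliminate variable_query out) := by unfold Spec_min_fill_ordering_helper; infer_instance

-- ===== CLAIM (what is proved, stated in full; the proofs are below) =====
def Claim_equal_min_fill_ordering_helper : Prop := ∀ (list_of_scopes : List (List String)) (vars_to_eliminate : List (String × Int)) (variable_query : String), Dom_min_fill_ordering_helper list_of_scopes vars_to_eliminate variable_query → Spec_min_fill_ordering_helper list_of_scopes vars_to_eliminate variable_query (min_fill_ordering_helper list_of_scopes vars_to_eliminate variable_query)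

-- ===== LEMMAS AND PROOFS =====

-- A's fill count of one variable (the inner double loop of A), named for the proofs.
def aCount (list_of_scopes : List (List String)) (var : String) : Int :=
  list_of_scopes.foldl (fun num scope =>
    if scope.contains var then
      scope.foldl (fun n v => if v ≠ var then n + 1 else n) num
    else num) 0

-- a fold of inserts whose value depends only on the key
theorem getD_foldl_insert_fun {g : String → Int} (ks : List String) (d : PySem.Dict String Int)
    (x : String) (dflt : Int) :
    (ks.foldl (fun dd v => dd.insert v (g v)) d).getD x dflt
      = if x ∈ ks then g x else d.getD x dflt := by
  induction ks generalizing d with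
  | nil => simp
  | cons k ks ih =>
    simp only [List.foldl_cons, ih, List.mem_cons]
    by_cases hx : x ∈ ks
    · simp [hx]
    · by_cases hk : x = k
      · subst hk; simp [hx, PySem.Dict.getD_insert_self]
      · simp [hx, hk, PySem.Dict.getD_insert_of_ne _ _ _ hk]

theorem sorted_head_aux {α κ : Type} [LT κ] [DecidableLT κ] (key : α → κ)
    (l : List α) (acc : List α) :
    (l.foldl (fun acc x => PySem.List.insertBy (fun a b => decide (key a < key b)) x acc) acc).head?
      = l.foldl (fun o x => match o with
          | none => some x
          | some m => if key x < key m then some x else some m) acc.head? := by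
  induction l generalizing acc with
  | nil => rfl
  | cons x l ih =>
    simp only [List.foldl_cons, ih]
    congr 1
    cases acc with
    | nil => rfl
    | cons y ys =>
      simp only [PySem.List.insertBy, List.head?_cons]
      by_cases h : key x < key y <;> simp [h]

-- head of the stable sort = Python's min (first minimal element)
theorem sorted_head {α κ : Type} [LT κ] [DecidableLT κ] (l : List α) (key : α → κ) :
    (PySem.List.sorted l key false).head? = PySem.List.min? l key := by
  rw [PySem.List.sorted_eq_foldl_insertBy]
  simpa using sorted_head_aux key l []

-- one scope's conditional-update fold over the occurrence items: keys are unchanged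
theorem keys_itemsFold (g : String × Int → Int) (items : List (String × Int))
    (cnt : PySem.Dict String Int) :
    (items.foldl (fun c p =>
        if c.contains p.1 then c.insert p.1 (c.getD p.1 0 + g p) else c) cnt).keys = cnt.keys := by
  induction items generalizing cnt with
  | nil => rfl
  | cons p items ih =>
    simp only [List.foldl_cons, ih]
    by_cases h : cnt.contains p.1 = true
    · simp [h, PySem.Dict.keys_insert_of_contains _ _ h]
    · simp [h]

theorem contains_itemsFold (g : String × Int → Int) (items : List (String × Int))
    (cnt : PySem.Dict String Int) (x : String) :
    (items.foldl (fun c p =>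
        if c.contains p.1 then c.insert p.1 (c.getD p.1 0 + g p) else c) cnt).contains x
      = cnt.contains x := by
  rw [PySem.Dict.contains_eq_decide_mem_keys, PySem.Dict.contains_eq_decide_mem_keys,
    keys_itemsFold]

theorem getD_itemsFold (g : String × Int → Int) (items : List (String × Int))
    (cnt : PySem.Dict String Int) (x : String) :
    (items.foldl (fun c p =>
        if c.contains p.1 then c.insert p.1 (c.getD p.1 0 + g p) else c) cnt).getD x 0
      = cnt.getD x 0
        + (if cnt.contains x then ((items.filter (fun p => p.1 == x)).map g).sum else 0) := by
  induction items generalizing cnt with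
  | nil => simp
  | cons p items ih =>
    simp only [List.foldl_cons, ih]
    by_cases hpx : p.1 = x
    · subst hpx
      by_cases hc : cnt.contains p.1 = true
      · simp [hc, PySem.Dict.getD_insert_self]
        ring
      · simp [hc]
    · have h1 : ∀ c : PySem.Dict String Int,
          (if c.contains p.1 = true then c.insert p.1 (c.getD p.1 0 + g p) else c).getD x 0
            = c.getD x 0 := by
        intro c
        by_cases hc : c.contains p.1 = true
        · simp [hc, PySem.Dict.getD_insert_of_ne _ _ _ (Ne.symm hpx)]
        · simp [hc]
      have h2 : (if cnt.contains p.1 = true then cnt.insert p.1 (cnt.getD p.1 0 + g p) else cnt).contains x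
            = cnt.contains x := by
        by_cases hc : cnt.contains p.1 = true
        · simp [hc, PySem.Dict.contains_insert, show (x == p.1) = false by simp [Ne.symm hpx]]
        · simp [hc]
      rw [h1, h2, List.filter_cons_of_neg (by simp [hpx])]

-- filtering a nodup list for one element
theorem filter_beq_nodup {α : Type} [DecidableEq α] (l : List α) (hnd : l.Nodup) (x : α) :
    l.filter (fun y => y == x) = if x ∈ l then [x] else [] := by
  induction l with
  | nil => simp
  | cons a l ih =>
    simp only [List.nodup_cons] at hnd
    rw [List.filter_cons]
    by_cases hax : a = x
    · subst hax
      simp [hnd.1, ih hnd.2]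
    · simp only [show (a == x) = false by simp [hax], ih hnd.2, List.mem_cons]
      by_cases hx : x ∈ l <;> simp [hx, Ne.symm hax]

-- the contribution of one scope to one variable's count
theorem scope_contrib (scope : List String) (x : String) :
    ((((scope.foldl (fun d v => d.insert v (d.getD v 0 + 1)) PySem.Dict.empty).items).filter
        (fun p => p.1 == x)).map (fun p => PySem.List.len scope - p.2)).sum
      = if x ∈ scope then ((PySem.List.len scope) - (scope.count x : Int)) else 0 := by
  rw [PySem.Dict.foldl_insert_getD_add_one_eq_counter, PySem.Dict.items_counter,
    List.filter_map]
  have : ((PySem.Set.ofList scope).filter (fun k => k == x)) = if x ∈ scope then [x] else [] := by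
    rw [filter_beq_nodup _ (PySem.Set.nodup_ofList scope) x]
    simp [PySem.Set.mem_ofList]
  simp only [Function.comp_def, this]
  by_cases hx : x ∈ scope <;> simp [hx]

-- A's count as a sum over the scopes containing the variable
theorem aCount_closed (list_of_scopes : List (List String)) (x : String) :
    aCount list_of_scopes x
      = (((list_of_scopes.filter (fun s => s.contains x)).map
          (fun s => (PySem.List.len s) - (s.count x : Int))).sum) := by
  unfold aCount
  rw [PySem.List.foldl_if_eq_foldl_filter]
  have h1 : ∀ (s : List String) (num : Int),
      s.foldl (fun n v => if v ≠ x then n + 1 else n) num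
        = num + ((PySem.List.len s) - (s.count x : Int)) := by
    intro s num
    rw [PySem.List.foldl_ite_add_one]
    have hcp : s.countP (fun v => decide ¬(v = x)) = s.length - s.count x := by
      have hlen := List.length_eq_countP_add_countP (fun v => decide (v = x)) (l := s)
      have hc : s.count x = s.countP (fun v => decide (v = x)) :=
        List.count_eq_countP
      have hnot : s.countP (fun a => decide ¬(decide (a = x)) = true)
          = s.countP (fun v => decide ¬(v = x)) :=
        List.countP_congr (fun a _ => by by_cases h : a = x <;> simp [h])
      omega
    have hle : s.count x ≤ s.length := List.count_le_length
    simp only [PySem.List.len_eq, hcp]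
    push_cast [Nat.cast_sub hle]
    ring_nf
  calc (list_of_scopes.filter (fun s => s.contains x)).foldl
        (fun num scope => scope.foldl (fun n v => if v ≠ x then n + 1 else n) num) 0
      = (list_of_scopes.filter (fun s => s.contains x)).foldl
        (fun num scope => num + ((PySem.List.len scope) - (scope.count x : Int))) 0 := by
        apply PySem.List.foldl_congr_mem
        intro acc s _
        exact h1 s acc
    _ = _ := by
        rw [PySem.List.foldl_add]
        simp

-- B's whole tally loop, pointwise
theorem counts_getD (list_of_scopes : List (List String)) (cnt : PySem.Dict String Int)
    (x : String) :
    (list_of_scopes.foldl (fun cnt scope =>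
        let length : Int := PySem.List.len scope
        let occ : PySem.Dict String Int :=
          scope.foldl (fun d v => d.insert v (d.getD v 0 + 1)) PySem.Dict.empty
        occ.items.foldl (fun cnt p =>
          if cnt.contains p.1 then cnt.insert p.1 (cnt.getD p.1 0 + (length - p.2)) else cnt) cnt)
        cnt).getD x 0
      = cnt.getD x 0 + (if cnt.contains x then aCount list_of_scopes x else 0) := by
  rw [aCount_closed]
  induction list_of_scopes generalizing cnt with
  | nil => simp
  | cons scope scopes ih =>
    simp only [List.foldl_cons, ih, contains_itemsFold, getD_itemsFold, scope_contrib,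
      List.filter_cons]
    by_cases hc : cnt.contains x = true
    · by_cases hx : x ∈ scope
      · simp only [hc, if_true, show scope.contains x = true by simpa using hx, hx,
          List.map_cons, List.sum_cons]
        ring
      · simp [hc, hx]
    · simp [hc]

theorem counts_keys (list_of_scopes : List (List String)) (cnt : PySem.Dict String Int) :
    (list_of_scopes.foldl (fun cnt scope =>
        let length : Int := PySem.List.len scope
        let occ : PySem.Dict String Int :=
          scope.foldl (fun d v => d.insert v (d.getD v 0 + 1)) PySem.Dict.empty
        occ.items.foldl (fun cnt p =>
          if cnt.contains p.1 then cnt.insert p.1 (cnt.getD p.1 0 + (length - p.2)) else cnt) cnt)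
        cnt).keys = cnt.keys := by
  induction list_of_scopes generalizing cnt with
  | nil => rfl
  | cons scope scopes ih => simp only [List.foldl_cons, ih, keys_itemsFold]

-- Set.update of a list with itself changes nothing
theorem set_update_self (s : List String) : PySem.Set.update s s = s := by
  rw [PySem.Set.update_eq_append_filter]
  have : (PySem.Set.ofList s).filter (fun y => !(PySem.Set.contains s y)) = [] := by
    apply List.filter_eq_nil_iff.mpr
    intro y hy
    rw [PySem.Set.mem_ofList] at hy
    simp [hy]
  rw [this, List.append_nil]

-- the Python `list_vars[0] if len > 0 else None` is head?
theorem head_if (l : List String) : (if 0 < l.length then l[0]? else none) = l.head? := by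
  cases l <;> simp

-- new-scope invariant: B's build (skipping v) is the ≠v-filter of A's build, and A's stays nodup
theorem ns_inner (v : String) (s : List String) :
    ∀ (a b : List String), a.Nodup → b = a.filter (fun x => x ≠ v) →
    (s.foldl (fun ns2 x => if ¬ ns2.contains x then ns2 ++ [x] else ns2) a).Nodup
    ∧ s.foldl (fun ns x => if x ≠ v ∧ ¬ ns.contains x then ns ++ [x] else ns) b
      = (s.foldl (fun ns2 x => if ¬ ns2.contains x then ns2 ++ [x] else ns2) a).filter
          (fun x => x ≠ v) := by
  induction s with
  | nil => intro a b ha hb; exact ⟨ha, hb⟩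
  | cons x s ih =>
    intro a b ha hb
    simp only [List.foldl_cons]
    by_cases hx : x ∈ a
    · by_cases hxv : x = v
      · subst hxv
        simpa [hx] using ih a b ha hb
      · have hxb : x ∈ b := by
          rw [hb]; simp [List.mem_filter, hx, hxv]
        simpa [hx, hxb] using ih a b ha hb
    · have ha' : (a ++ [x]).Nodup := by
        simp only [List.nodup_append, List.nodup_singleton, ha, true_and]
        intro y hy z hz
        simp only [List.mem_singleton] at hz
        subst hz
        exact fun he => hx (he ▸ hy)
      by_cases hxv : x = v
      · subst hxv
        have hb' : b = (a ++ [x]).filter (fun y => y ≠ x) := by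
          rw [hb, List.filter_append]; simp
        simpa [hx] using ih (a ++ [x]) b ha' hb'
      · have hxb : x ∉ b := by
          rw [hb]; simp [List.mem_filter, hx]
        have hb' : b ++ [x] = (a ++ [x]).filter (fun y => y ≠ v) := by
          rw [hb, List.filter_append]; simp [hxv]
        simpa [hx, hxb, hxv] using ih (a ++ [x]) (b ++ [x]) ha' hb'

theorem ns_outer (v : String) (scopes : List (List String)) :
    ∀ (a b : List String), a.Nodup → b = a.filter (fun x => x ≠ v) →
    (scopes.foldl (fun ns s =>
        if s.contains v then
          s.foldl (fun ns2 x => if ¬ ns2.contains x then ns2 ++ [x] else ns2) ns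
        else ns) a).Nodup
    ∧ scopes.foldl (fun ns s =>
        if s.contains v then
          s.foldl (fun ns x => if x ≠ v ∧ ¬ ns.contains x then ns ++ [x] else ns) ns
        else ns) b
      = (scopes.foldl (fun ns s =>
          if s.contains v then
            s.foldl (fun ns2 x => if ¬ ns2.contains x then ns2 ++ [x] else ns2) ns
          else ns) a).filter (fun x => x ≠ v) := by
  induction scopes with
  | nil => intro a b ha hb; exact ⟨ha, hb⟩
  | cons s scopes ih =>
    intro a b ha hb
    simp only [List.foldl_cons]
    by_cases hs : s.contains v = true
    · simp only [hs, if_true]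
      exact ih _ _ (ns_inner v s a b ha hb).1 (ns_inner v s a b ha hb).2
    · simp only [hs, Bool.false_eq_true, if_false]
      exact ih a b ha hb

-- A's trailing `if v in new_scope: new_scope.remove(v)` on a nodup list is the ≠v-filter
theorem remove_eq_filter (l : List String) (v : String) (h : l.Nodup) :
    (if l.contains v then (PySem.List.remove? l v).getD l else l)
      = l.filter (fun x => x ≠ v) := by
  by_cases hv : v ∈ l
  · have hidx : List.idxOf? v l ≠ none := by
      simpa [List.idxOf?_eq_none_iff] using hv
    simp only [show l.contains v = true by simpa using hv, if_true, PySem.List.remove?]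
    cases hidx' : List.idxOf? v l with
    | none => exact absurd hidx' hidx
    | some k =>
      have : l.eraseIdx k = l.erase v := by
        have hik : List.idxOf v l = k := by
          rw [List.idxOf_eq_getD_idxOf?, hidx']; rfl
        rw [List.erase_eq_eraseIdx_of_idxOf hik]
      simp only [Option.map_some, Option.getD_some, this]
      rw [List.Nodup.erase_eq_filter h]
      apply List.filter_congr
      intro x _
      by_cases hxv : x = v
      · subst hxv; simp
      · simp [hxv]
  · have hfix : l.filter (fun x => x ≠ v) = l :=
      List.filter_eq_self.mpr (by intro x hx; have hne : x ≠ v := fun he => hv (he ▸ hx); simpa using hne)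
    rw [if_neg (by simpa using hv)]
    exact hfix.symm

-- ===== VERDICT (by name: the statement is the Claim_ definition above) =====
theorem min_fill_ordering_helper_spec : Claim_equal_min_fill_ordering_helper := by
  intro scopes vars q _
  unfold Spec_min_fill_ordering_helper min_fill_ordering_helper min_fill_ordering_helper_alt
  simp only []
  -- shared key list
  set K : List String := PySem.Set.ofList (vars.map Prod.fst) with hK
  have hKnd : K.Nodup := PySem.Set.nodup_ofList _
  -- A side: keys of the input dict
  have hd0keys : (PySem.Dict.ofList vars).keys = K := by
    show (PySem.Dict.empty.update vars).keys = K
    unfold PySem.Dict.update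
    rw [PySem.Dict.keys_foldl_insert_key vars Prod.fst (fun _ p => p.2) PySem.Dict.empty]
    simp [PySem.Set.update_nil_left, hK]
  -- A side: the rewritten dict d1
  set d0 := PySem.Dict.ofList vars with hd0
  set d1 := d0.keys.foldl (fun dd var =>
      dd.insert var (scopes.foldl (fun num scope =>
        if scope.contains var then
          scope.foldl (fun n v => if v ≠ var then n + 1 else n) num
        else num) 0)) d0 with hd1
  have hd1keys : d1.keys = K := by
    rw [hd1, PySem.Dict.keys_foldl_insert, set_update_self, hd0keys]
  have hd1nd : d1.keys.Nodup := by rw [hd1keys]; exact hKnd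
  have hd1getD : ∀ x ∈ K, d1.getD x 0 = aCount scopes x := by
    intro x hx
    rw [hd1, getD_foldl_insert_fun
      (g := fun var => scopes.foldl (fun num scope =>
        if scope.contains var then
          scope.foldl (fun n v => if v ≠ var then n + 1 else n) num
        else num) 0), hd0keys]
    simp only [hx, if_true]
    rfl
  have hd1items : d1.items = K.map (fun k => (k, aCount scopes k)) := by
    rw [PySem.Dict.items_eq_map_keys d1 hd1nd 0, hd1keys]
    exact List.map_congr_left (fun k hk => by rw [hd1getD k hk])
  -- B side: init
  set init : PySem.Dict String Int := K.foldl (fun d var => d.insert var 0) PySem.Dict.empty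
    with hinit
  have hinitkeys : init.keys = K := by
    rw [hinit, PySem.Dict.keys_foldl_insert]
    simp [PySem.Set.update_nil_left, PySem.Set.ofList_eq_self_of_nodup _ hKnd]
  have hinitgetD : ∀ x, init.getD x 0 = 0 := by
    intro x
    rw [hinit, getD_foldl_insert_fun (g := fun _ => 0)]
    split <;> simp
  -- B side: counts
  set counts := scopes.foldl (fun cnt scope =>
      let length : Int := PySem.List.len scope
      let occ : PySem.Dict String Int :=
        scope.foldl (fun d v => d.insert v (d.getD v 0 + 1)) PySem.Dict.empty
      occ.items.foldl (fun cnt p =>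
        if cnt.contains p.1 then cnt.insert p.1 (cnt.getD p.1 0 + (length - p.2)) else cnt) cnt)
      init with hcounts
  have hckeys : counts.keys = K := by rw [hcounts, counts_keys, hinitkeys]
  have hcnd : counts.keys.Nodup := by rw [hckeys]; exact hKnd
  have hcgetD : ∀ x ∈ K, counts.getD x 0 = aCount scopes x := by
    intro x hx
    rw [hcounts, counts_getD, hinitgetD,
      show init.contains x = true by
        rw [PySem.Dict.contains_eq_decide_mem_keys, hinitkeys]; simpa using hx]
    simp
  have hcitems : counts.items = d1.items := by
    rw [PySem.Dict.items_eq_map_keys counts hcnd 0, hckeys, hd1items]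
    exact List.map_congr_left (fun k hk => by rw [hcgetD k hk])
  -- the selected variable is the same on both sides
  have hsortkeys : (PySem.Dict.ofList
      (PySem.List.sorted d1.items (fun item => item.2) false)).keys
      = (PySem.List.sorted d1.items (fun item => item.2) false).map Prod.fst := by
    have hperm : (PySem.List.sorted d1.items (fun item => item.2) false).Perm d1.items :=
      PySem.List.sorted_perm _ _ _
    have hnd : ((PySem.List.sorted d1.items (fun item => item.2) false).map Prod.fst).Nodup :=
      ((hperm.map Prod.fst).nodup_iff).mpr (by
        have : d1.items.map Prod.fst = d1.keys := rfl
        rw [this]; exact hd1nd)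
    show (PySem.Dict.empty.update _).keys = _
    unfold PySem.Dict.update
    rw [PySem.Dict.keys_foldl_insert_key _ Prod.fst (fun _ p => p.2) PySem.Dict.empty]
    simp [PySem.Set.update_nil_left, PySem.Set.ofList_eq_self_of_nodup _ hnd]
  have hvar : (if 0 < ((PySem.Dict.ofList
        (PySem.List.sorted d1.items (fun item => item.2) false)).keys).length then
        ((PySem.Dict.ofList (PySem.List.sorted d1.items (fun item => item.2) false)).keys)[0]?
      else none)
      = (PySem.List.min? counts.items (fun item => item.2)).map Prod.fst := by
    rw [head_if, hsortkeys, List.head?_map, sorted_head, hcitems]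
  -- case on the minimum
  cases hmin : PySem.List.min? counts.items (fun item => item.2) with
  | none =>
    rw [hmin] at hvar
    simp only [hvar, Option.map_none, Prod.mk.injEq]
    refine ⟨trivial, ?_⟩
    have hfn : (fun (ns : List String) (s : List String) =>
        if false = true then
          s.foldl (fun ns2 v => if ¬ ns2.contains v = true then ns2 ++ [v] else ns2) ns
        else ns) = fun ns _ => ns := by
      funext ns s; simp
    rw [hfn]
    exact PySem.List.foldl_ignore _ _
  | some best =>
    rw [hmin] at hvar
    simp only [hvar, Option.map_some, Prod.mk.injEq]
    refine ⟨trivial, ?_⟩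
    have h2 := ns_outer best.1 scopes [] [] List.nodup_nil (by simp)
    rw [remove_eq_filter _ _ h2.1, ← h2.2]
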